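-- pv_equiv track=rewrite | github.com/hmxmilohax/festivalinfobot | compare_midi.py | compare_text_events
-- ===== SOURCE A (Python) =====
-- def compare_text_events(track1_text_events, track2_text_events):
--     differences = []
--
--     times1 = {time for time, _ in track1_text_events}
--     times2 = {time for time, _ in track2_text_events}
--     all_times = sorted(times1 | times2)
--
--     text1_dict = dict(track1_text_events)
--     text2_dict = dict(track2_text_events)
--
--     for time in all_times:
--         text1 = text1_dict.get(time, "[no event]")
--         text2 = text2_dict.get(time, "[no event]")
--         if text1 != text2:
--             differences.append((time, text1, text2))
--
--     return differences
-- ===== SOURCE B (Python) =====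
-- def compare_text_events(track1_text_events, track2_text_events):
--     NO_EVENT = "[no event]"
--     s1 = sorted(track1_text_events, key=lambda p: p[0])
--     s2 = sorted(track2_text_events, key=lambda p: p[0])
--     n, m = len(s1), len(s2)
--     out = []
--     i, j = 0, 0
--     while i < n or j < m:
--         if j >= m or (i < n and s1[i][0] < s2[j][0]):
--             t, v = s1[i]
--             i += 1
--             while i < n and s1[i][0] == t:
--                 v = s1[i][1]
--                 i += 1
--             if v != NO_EVENT:
--                 out.append((t, v, NO_EVENT))
--         elif i >= n or s2[j][0] < s1[i][0]:
--             t, w = s2[j]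
--             j += 1
--             while j < m and s2[j][0] == t:
--                 w = s2[j][1]
--                 j += 1
--             if w != NO_EVENT:
--                 out.append((t, NO_EVENT, w))
--         else:
--             t, v = s1[i]
--             i += 1
--             while i < n and s1[i][0] == t:
--                 v = s1[i][1]
--                 i += 1
--             w = s2[j][1]
--             j += 1
--             while j < m and s2[j][0] == t:
--                 w = s2[j][1]
--                 j += 1
--             if v != w:
--                 out.append((t, v, w))
--     return out
-- ===== Notes on version B (the rewrite author's own statement) =====
-- stated objective: alternative
-- what changed: Replaces the set-union/double-dict construction with a stable sort of each track followed by a two-pointer merge that collapses equal-time runs (last text wins) and emits differences against the '[no event]' sentinel.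
import Mathlib
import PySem

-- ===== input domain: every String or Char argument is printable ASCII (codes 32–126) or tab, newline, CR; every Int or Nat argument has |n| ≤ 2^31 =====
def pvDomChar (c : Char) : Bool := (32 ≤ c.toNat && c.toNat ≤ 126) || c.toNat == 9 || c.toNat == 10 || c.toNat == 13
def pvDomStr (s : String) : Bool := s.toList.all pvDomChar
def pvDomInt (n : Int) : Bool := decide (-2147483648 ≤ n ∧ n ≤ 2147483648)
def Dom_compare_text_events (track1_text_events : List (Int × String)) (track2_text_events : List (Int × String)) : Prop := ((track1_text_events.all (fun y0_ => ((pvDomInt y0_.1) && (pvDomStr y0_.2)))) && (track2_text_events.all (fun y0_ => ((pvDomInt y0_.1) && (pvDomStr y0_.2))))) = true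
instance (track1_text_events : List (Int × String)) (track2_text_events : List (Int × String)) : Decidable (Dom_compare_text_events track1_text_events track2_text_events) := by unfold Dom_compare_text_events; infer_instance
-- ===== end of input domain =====

-- B replaces the set-union/double-dict construction by a stable sort of each track plus a
-- two-pointer run-collapsing merge (objective: alternative algorithm of similar cost).

-- ===== PORT A =====
def compare_text_events (track1_text_events : List (Int × String)) (track2_text_events : List (Int × String)) : List (Int × String × String) :=
  let times1 : PySem.Set Int := PySem.Set.ofList (track1_text_events.map (fun p => p.1))
  let times2 : PySem.Set Int := PySem.Set.ofList (track2_text_events.map (fun p => p.1))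
  let all_times := PySem.List.sorted (PySem.Set.union times1 times2) (fun x => x)
  let text1_dict := PySem.Dict.ofList track1_text_events
  let text2_dict := PySem.Dict.ofList track2_text_events
  all_times.foldl (fun differences time =>
    let text1 := text1_dict.getD time "[no event]"
    let text2 := text2_dict.getD time "[no event]"
    if text1 ≠ text2 then differences ++ [(time, text1, text2)] else differences) []

-- ===== PORT B =====
-- inner `while` of Source B: consume the run of entries with time `t`, keeping the last text
def popRun (t : Int) (v : String) : List (Int × String) → String × List (Int × String)
  | [] => (v, [])
  | (u, w) :: rest => if u = t then popRun t w rest else (v, (u, w) :: rest)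

-- termination measure for the merge below (cited by `decreasing_by`)
theorem popRun_snd_length_le (t : Int) (v : String) (l : List (Int × String)) :
    (popRun t v l).2.length ≤ l.length := by
  induction l generalizing v with
  | nil => simp [popRun]
  | cons p rest ih =>
    obtain ⟨u, w⟩ := p
    simp only [popRun]
    split
    · exact (ih w).trans (by simp)
    · simp

-- outer `while` of Source B: the two pointers are the two remaining suffixes
def mergeDiff : List (Int × String) → List (Int × String) → List (Int × String × String)
  | [], [] => []
  | (t, x) :: r1, [] =>
      let pr := popRun t x r1
      (if pr.1 ≠ "[no event]" then [(t, pr.1, "[no event]")] else []) ++ mergeDiff pr.2 []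
  | [], (t, y) :: r2 =>
      let pr := popRun t y r2
      (if pr.1 ≠ "[no event]" then [(t, "[no event]", pr.1)] else []) ++ mergeDiff [] pr.2
  | (t1, x) :: r1, (t2, y) :: r2 =>
      if t1 < t2 then
        let pr := popRun t1 x r1
        (if pr.1 ≠ "[no event]" then [(t1, pr.1, "[no event]")] else []) ++ mergeDiff pr.2 ((t2, y) :: r2)
      else if t2 < t1 then
        let pr := popRun t2 y r2
        (if pr.1 ≠ "[no event]" then [(t2, "[no event]", pr.1)] else []) ++ mergeDiff ((t1, x) :: r1) pr.2
      else
        let p1 := popRun t1 x r1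
        let p2 := popRun t1 y r2
        (if p1.1 ≠ p2.1 then [(t1, p1.1, p2.1)] else []) ++ mergeDiff p1.2 p2.2
termination_by l1 l2 => l1.length + l2.length
decreasing_by
  all_goals simp only [List.length_cons]
  · have := popRun_snd_length_le t x r1; omega
  · have := popRun_snd_length_le t y r2; omega
  · have := popRun_snd_length_le t1 x r1; omega
  · have := popRun_snd_length_le t2 y r2; omega
  · have h1 := popRun_snd_length_le t1 x r1; have h2 := popRun_snd_length_le t1 y r2; omega

def compare_text_events_alt (track1_text_events : List (Int × String)) (track2_text_events : List (Int × String)) : List (Int × String × String) :=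
  mergeDiff (PySem.List.sorted track1_text_events (fun p => p.1))
            (PySem.List.sorted track2_text_events (fun p => p.1))

-- ===== PRECONDITION & SPEC =====
def Spec_compare_text_events (track1_text_events : List (Int × String)) (track2_text_events : List (Int × String)) (out : List (Int × String × String)) : Prop := out = compare_text_events_alt track1_text_events track2_text_events
instance (track1_text_events : List (Int × String)) (track2_text_events : List (Int × String)) (out : List (Int × String × String)) : Decidable (Spec_compare_text_events track1_text_events track2_text_events out) := by unfold Spec_compare_text_events; infer_instance

-- ===== CLAIM (what is proved, stated in full; the proofs are below) =====
def Claim_equal_compare_text_events : Prop := ∀ (track1_text_events : List (Int × String)) (track2_text_events : List (Int × String)), Dom_compare_text_events track1_text_events track2_text_events → Spec_compare_text_events track1_text_events track2_text_events (compare_text_events track1_text_events track2_text_events)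

-- ===== LEMMAS AND PROOFS =====

-- the value dict(xs).get(t, "[no event]") actually computes: the LAST text at time t, else the sentinel
def lastFrom (t : Int) (a : String) (xs : List (Int × String)) : String :=
  xs.foldl (fun a p => if p.1 = t then p.2 else a) a

def lastT (t : Int) (xs : List (Int × String)) : String := lastFrom t "[no event]" xs

-- per-time contribution of the output, shared by the reductions of both ports
def gOut (a b : List (Int × String)) (t : Int) : List (Int × String × String) :=
  if lastT t a ≠ lastT t b then [(t, lastT t a, lastT t b)] else []

theorem lastFrom_append (t : Int) (a : String) (xs ys : List (Int × String)) :
    lastFrom t a (xs ++ ys) = lastFrom t (lastFrom t a xs) ys := by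
  simp [lastFrom, List.foldl_append]

theorem getD_update_eq_lastFrom (xs : List (Int × String)) (d : PySem.Dict Int String) (t : Int) :
    (d.update xs).getD t "[no event]" = lastFrom t (d.getD t "[no event]") xs := by
  induction xs generalizing d with
  | nil => rfl
  | cons p rest ih =>
    obtain ⟨k, v⟩ := p
    simp only [PySem.Dict.update, List.foldl_cons, lastFrom] at *
    rw [ih (d.insert k v)]
    rw [PySem.Dict.getD_insert]
    by_cases h : t = k
    · subst h; simp
    · rw [if_neg h, if_neg (fun hh => h hh.symm)]

theorem getD_ofList_eq_lastT (xs : List (Int × String)) (t : Int) :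
    (PySem.Dict.ofList xs).getD t "[no event]" = lastT t xs := by
  rw [PySem.Dict.ofList, getD_update_eq_lastFrom, PySem.Dict.getD_empty]; rfl

theorem lastFrom_no_match (t : Int) (a : String) (xs : List (Int × String))
    (h : ∀ p ∈ xs, p.1 ≠ t) : lastFrom t a xs = a := by
  induction xs generalizing a with
  | nil => rfl
  | cons p rest ih =>
    simp only [lastFrom, List.foldl_cons]
    rw [if_neg (h p (by simp))]
    exact ih a (fun q hq => h q (by simp [hq]))

theorem filter_insertBy (x : Int × String) (ys : List (Int × String)) (t : Int)
    (h : ys.Pairwise (fun a b => a.1 ≤ b.1)) :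
    (PySem.List.insertBy (fun a b => decide (a.1 < b.1)) x ys).filter (fun p => p.1 == t)
      = ys.filter (fun p => p.1 == t) ++ (if x.1 = t then [x] else []) := by
  induction ys with
  | nil => simp [PySem.List.insertBy, List.filter]; split <;> simp_all
  | cons y ys' ih =>
    rw [List.pairwise_cons] at h
    simp only [PySem.List.insertBy]
    by_cases hlt : x.1 < y.1
    · rw [if_pos (by simpa using hlt)]
      by_cases hxt : x.1 = t
      · have hy : ∀ p ∈ y :: ys', p.1 ≠ t := by
          intro p hp
          rcases List.mem_cons.mp hp with rfl | hp'
          · omega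
          · have := h.1 p hp'; omega
        have h1 : (y :: ys').filter (fun p => p.1 == t) = [] :=
          List.filter_eq_nil_iff.mpr (by intro p hp; simpa using hy p hp)
        rw [List.filter_cons, if_pos (by simpa using hxt), h1, if_pos hxt]
        simp
      · simp only [List.filter_cons]
        rw [if_neg (by simpa using hxt), if_neg hxt]
        simp
    · rw [if_neg (by simpa using hlt)]
      simp only [List.filter_cons]
      rw [ih h.2]
      split <;> simp

theorem filter_sorted (xs : List (Int × String)) (t : Int) :
    (PySem.List.sorted xs (fun p => p.1)).filter (fun p => p.1 == t)
      = xs.filter (fun p => p.1 == t) := by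
  induction xs using List.reverseRecOn with
  | nil => rfl
  | append_singleton xs x ih =>
    have hfold : PySem.List.sorted (xs ++ [x]) (fun p => p.1)
        = PySem.List.insertBy (fun a b => decide (a.1 < b.1)) x (PySem.List.sorted xs (fun p => p.1)) := by
      rw [PySem.List.sorted_eq_foldl_insertBy, PySem.List.sorted_eq_foldl_insertBy, List.foldl_append]
      rfl
    rw [hfold, filter_insertBy x _ t (PySem.List.sorted_pairwise xs (fun p => p.1)), ih,
      List.filter_append]
    congr 1
    by_cases h : x.1 = t <;> simp [h]

theorem lastFrom_filter (t : Int) (a : String) (xs : List (Int × String)) :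
    lastFrom t a xs = lastFrom t a (xs.filter (fun p => p.1 == t)) := by
  induction xs generalizing a with
  | nil => rfl
  | cons p rest ih =>
    by_cases h : p.1 = t
    · simp only [lastFrom, List.foldl_cons, List.filter_cons, if_pos h] at *
      rw [if_pos (by simpa using h)]
      simp only [List.foldl_cons, if_pos h]
      exact ih p.2
    · simp only [lastFrom, List.foldl_cons, List.filter_cons, if_neg h] at *
      rw [if_neg (by simpa using h)]
      exact ih a

theorem lastT_sorted (xs : List (Int × String)) (t : Int) :
    lastT t (PySem.List.sorted xs (fun p => p.1)) = lastT t xs := by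
  unfold lastT
  rw [lastFrom_filter, filter_sorted, ← lastFrom_filter]

theorem foldl_diff_flatMap (U : List Int) (acc : List (Int × String × String))
    (F G : Int → String) :
    U.foldl (fun acc t => if F t ≠ G t then acc ++ [(t, F t, G t)] else acc) acc
      = acc ++ U.flatMap (fun t => if F t ≠ G t then [(t, F t, G t)] else []) := by
  induction U generalizing acc with
  | nil => simp
  | cons u U' ih =>
    simp only [List.foldl_cons, List.flatMap_cons]
    rw [ih]
    by_cases h : F u ≠ G u
    · rw [if_pos h, if_pos h]; simp
    · rw [if_neg h, if_neg h]; simp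

theorem A_eq_flatMap (t1 t2 : List (Int × String)) :
    compare_text_events t1 t2
      = (PySem.List.sorted (PySem.Set.union (PySem.Set.ofList (t1.map (fun p => p.1)))
            (PySem.Set.ofList (t2.map (fun p => p.1)))) (fun x => x)).flatMap (gOut t1 t2) := by
  unfold compare_text_events
  rw [foldl_diff_flatMap]
  rw [List.nil_append]
  apply List.flatMap_congr
  intro t _
  simp only [gOut, getD_ofList_eq_lastT]

theorem popRun_eq (t : Int) (v : String) (l : List (Int × String))
    (hlb : ∀ p ∈ l, t ≤ p.1) (hs : l.Pairwise (fun a b => a.1 ≤ b.1)) :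
    popRun t v l = (lastFrom t v l, l.dropWhile (fun p => p.1 == t)) := by
  induction l generalizing v with
  | nil => rfl
  | cons p rest ih =>
    obtain ⟨u, w⟩ := p
    rw [List.pairwise_cons] at hs
    by_cases h : u = t
    · simp only [popRun, lastFrom, List.foldl_cons, h, List.dropWhile_cons]
      rw [ih w (fun q hq => hlb q (by simp [hq])) hs.2]
      simp [lastFrom]
    · have hu : t < u := lt_of_le_of_ne (hlb (u, w) (by simp)) (fun hh => h hh.symm)
      have hnm : ∀ q ∈ (u, w) :: rest, q.1 ≠ t := by
        intro q hq
        rcases List.mem_cons.mp hq with rfl | hq'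
        · simpa using h
        · have := hs.1 q hq'; simp at this ⊢; omega
      simp only [popRun, if_neg h]
      rw [lastFrom_no_match t v _ hnm, List.dropWhile_cons]
      simp [h]

theorem dropWhile_keys_gt (t : Int) (l : List (Int × String))
    (hlb : ∀ p ∈ l, t ≤ p.1) (hs : l.Pairwise (fun a b => a.1 ≤ b.1)) :
    ∀ p ∈ l.dropWhile (fun p => p.1 == t), t < p.1 := by
  induction l with
  | nil => simp
  | cons p rest ih =>
    obtain ⟨u, w⟩ := p
    rw [List.pairwise_cons] at hs
    rw [List.dropWhile_cons]
    by_cases h : u = t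
    · simp only [h]
      simp only [show ((t : Int) == t) = true by simp, if_true]
      exact ih (fun q hq => hlb q (by simp [hq])) hs.2
    · simp only [show ((u : Int) == t) = false by simp [h], Bool.false_eq_true, if_false]
      intro q hq
      have hu : t < u := lt_of_le_of_ne (hlb (u, w) (by simp)) (fun hh => h hh.symm)
      rcases List.mem_cons.mp hq with rfl | hq'
      · simpa using hu
      · have := hs.1 q hq'; simp at this; omega

theorem lastT_dropWhile (w t : Int) (l : List (Int × String)) (hw : w ≠ t) :
    lastT w l = lastT w (l.dropWhile (fun p => p.1 == t)) := by
  unfold lastT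
  conv_lhs => rw [← List.takeWhile_append_dropWhile (p := fun p => p.1 == t) (l := l)]
  rw [lastFrom_append]
  congr 1
  apply lastFrom_no_match
  intro p hp
  have := List.mem_takeWhile_imp hp
  simp at this
  omega

theorem keys_dropWhile_mem (w t : Int) (l : List (Int × String)) (hw : w ≠ t) :
    w ∈ (l.dropWhile (fun p => p.1 == t)).map (fun p => p.1) ↔ w ∈ l.map (fun p => p.1) := by
  constructor
  · intro h
    exact (List.map_subset _ (List.dropWhile_sublist _ |>.subset)) h
  · intro h
    conv_lhs at h => rw [← List.takeWhile_append_dropWhile (p := fun p => p.1 == t) (l := l)]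
    rw [List.map_append, List.mem_append] at h
    rcases h with h | h
    · exfalso
      obtain ⟨p, hp, rfl⟩ := List.mem_map.mp h
      have := List.mem_takeWhile_imp hp
      simp at this; omega
    · exact h

theorem U_decomp (U : List Int) (t : Int) (hU : U.Pairwise (· < ·)) (ht : t ∈ U)
    (hlb : ∀ u ∈ U, t ≤ u) :
    ∃ V, U = t :: V ∧ V.Pairwise (· < ·) ∧ ∀ w ∈ V, t < w := by
  cases U with
  | nil => cases ht
  | cons u V =>
    rw [List.pairwise_cons] at hU
    have hut : u = t := by
      have h1 : t ≤ u := hlb u (by simp)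
      rcases List.mem_cons.mp ht with rfl | h2
      · rfl
      · have := hU.1 t h2; omega
    subst hut
    exact ⟨V, rfl, hU.2, hU.1⟩

theorem lastT_cons_self (t : Int) (x : String) (r : List (Int × String)) :
    lastT t ((t, x) :: r) = lastFrom t x r := by
  simp [lastT, lastFrom]

theorem lastT_cons_ne (u w : Int) (x : String) (r : List (Int × String)) (h : u ≠ w) :
    lastT w ((u, x) :: r) = lastT w r := by
  simp [lastT, lastFrom, h]

theorem lastT_nil (t : Int) : lastT t [] = "[no event]" := rfl

theorem merge_eq (N : Nat) : ∀ (s1 s2 : List (Int × String)) (U : List Int),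
    s1.length + s2.length ≤ N →
    s1.Pairwise (fun a b => a.1 ≤ b.1) → s2.Pairwise (fun a b => a.1 ≤ b.1) →
    U.Pairwise (· < ·) →
    (∀ u, u ∈ U ↔ u ∈ s1.map (fun p => p.1) ∨ u ∈ s2.map (fun p => p.1)) →
    mergeDiff s1 s2 = U.flatMap (gOut s1 s2) := by
  induction N with
  | zero =>
    intro s1 s2 U hlen h1 h2 hU hmem
    have hs1 : s1 = [] := by cases s1 <;> simp_all
    have hs2 : s2 = [] := by cases s2 <;> simp_all
    subst hs1; subst hs2
    cases U with
    | nil => simp [mergeDiff]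
    | cons u V => exact absurd ((hmem u).mp (by simp)) (by simp)
  | succ N ihN =>
    intro s1 s2 U hlen h1 h2 hU hmem
    match s1, s2 with
    | [], [] =>
      cases U with
      | nil => simp [mergeDiff]
      | cons u V => exact absurd ((hmem u).mp (by simp)) (by simp)
    | (t, x) :: r1, [] =>
      rw [List.pairwise_cons] at h1
      have hlb1 : ∀ p ∈ r1, t ≤ p.1 := fun p hp => h1.1 p hp
      have hpr := popRun_eq t x r1 hlb1 h1.2
      set r1' := r1.dropWhile (fun p => p.1 == t) with hr1'
      have hUlb : ∀ u ∈ U, t ≤ u := by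
        intro u hu
        rcases (hmem u).mp hu with h | h
        · rcases List.mem_map.mp h with ⟨p, hp, rfl⟩
          rcases List.mem_cons.mp hp with rfl | hp'
          · simp
          · exact hlb1 p hp'
        · simp at h
      obtain ⟨V, rfl, hV, hVgt⟩ := U_decomp U t hU ((hmem t).mpr (by simp)) hUlb
      have hVmem : ∀ w, w ∈ V ↔ w ∈ r1'.map (fun p => p.1) ∨ w ∈ ([] : List (Int × String)).map (fun p => p.1) := by
        intro w
        constructor
        · intro hw
          have hwt : w ≠ t := by have := hVgt w hw; omega
          left
          rcases (hmem w).mp (by simp [hw]) with h | h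
          · rcases List.mem_map.mp h with ⟨p, hp, rfl⟩
            rcases List.mem_cons.mp hp with rfl | hp'
            · simp at hwt
            · exact (keys_dropWhile_mem _ t r1 hwt).mpr (List.mem_map_of_mem hp')
          · simp at h
        · intro hw
          rcases hw with hw | hw
          · rcases List.mem_map.mp hw with ⟨p, hp, rfl⟩
            have hgt : t < p.1 := dropWhile_keys_gt t r1 hlb1 h1.2 p hp
            have := (hmem p.1).mpr (Or.inl (by
              refine List.mem_map_of_mem ?_
              exact List.mem_cons_of_mem _ ((List.dropWhile_sublist _).subset hp)))
            rcases List.mem_cons.mp this with h | h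
            · omega
            · exact h
          · simp at hw
      have hlen' : r1'.length + 0 ≤ N := by
        have := List.Sublist.length_le (List.dropWhile_sublist (l := r1) (p := fun p => p.1 == t))
        rw [← hr1'] at this
        simp only [List.length_cons] at hlen
        omega
      have hsort' : r1'.Pairwise (fun a b => a.1 ≤ b.1) :=
        h1.2.sublist (List.dropWhile_sublist _)
      have hIH := ihN r1' [] V hlen' hsort' (by simp) hV hVmem
      have hlast : lastT t ((t, x) :: r1) = lastFrom t x r1 := lastT_cons_self t x r1
      simp only [mergeDiff, hpr]
      rw [hIH]
      have hcong : V.flatMap (gOut r1' []) = V.flatMap (gOut ((t, x) :: r1) []) := by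
        apply List.flatMap_congr
        intro w hw
        have hwt : w ≠ t := by have := hVgt w hw; omega
        have : lastT w ((t, x) :: r1) = lastT w r1' := by
          rw [lastT_cons_ne t w x r1 (fun hh => hwt hh.symm), lastT_dropWhile w t r1 hwt]
        simp [gOut, this]
      rw [hcong, List.flatMap_cons]
      congr 1
      simp only [gOut, hlast, lastT_nil]
    | [], (t, y) :: r2 =>
      rw [List.pairwise_cons] at h2
      have hlb2 : ∀ p ∈ r2, t ≤ p.1 := fun p hp => h2.1 p hp
      have hpr := popRun_eq t y r2 hlb2 h2.2
      set r2' := r2.dropWhile (fun p => p.1 == t) with hr2'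
      have hUlb : ∀ u ∈ U, t ≤ u := by
        intro u hu
        rcases (hmem u).mp hu with h | h
        · simp at h
        · rcases List.mem_map.mp h with ⟨p, hp, rfl⟩
          rcases List.mem_cons.mp hp with rfl | hp'
          · simp
          · exact hlb2 p hp'
      obtain ⟨V, rfl, hV, hVgt⟩ := U_decomp U t hU ((hmem t).mpr (by simp)) hUlb
      have hVmem : ∀ w, w ∈ V ↔ w ∈ ([] : List (Int × String)).map (fun p => p.1) ∨ w ∈ r2'.map (fun p => p.1) := by
        intro w
        constructor
        · intro hw
          have hwt : w ≠ t := by have := hVgt w hw; omega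
          right
          rcases (hmem w).mp (by simp [hw]) with h | h
          · simp at h
          · rcases List.mem_map.mp h with ⟨p, hp, rfl⟩
            rcases List.mem_cons.mp hp with rfl | hp'
            · simp at hwt
            · exact (keys_dropWhile_mem _ t r2 hwt).mpr (List.mem_map_of_mem hp')
        · intro hw
          rcases hw with hw | hw
          · simp at hw
          · rcases List.mem_map.mp hw with ⟨p, hp, rfl⟩
            have hgt : t < p.1 := dropWhile_keys_gt t r2 hlb2 h2.2 p hp
            have := (hmem p.1).mpr (Or.inr (by
              refine List.mem_map_of_mem ?_
              exact List.mem_cons_of_mem _ ((List.dropWhile_sublist _).subset hp)))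
            rcases List.mem_cons.mp this with h | h
            · omega
            · exact h
      have hlen' : 0 + r2'.length ≤ N := by
        have := List.Sublist.length_le (List.dropWhile_sublist (l := r2) (p := fun p => p.1 == t))
        rw [← hr2'] at this
        simp only [List.length_cons] at hlen
        omega
      have hsort' : r2'.Pairwise (fun a b => a.1 ≤ b.1) :=
        h2.2.sublist (List.dropWhile_sublist _)
      have hIH := ihN [] r2' V hlen' (by simp) hsort' hV hVmem
      have hlast : lastT t ((t, y) :: r2) = lastFrom t y r2 := lastT_cons_self t y r2
      simp only [mergeDiff, hpr]
      rw [hIH]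
      have hcong : V.flatMap (gOut [] r2') = V.flatMap (gOut [] ((t, y) :: r2)) := by
        apply List.flatMap_congr
        intro w hw
        have hwt : w ≠ t := by have := hVgt w hw; omega
        have : lastT w ((t, y) :: r2) = lastT w r2' := by
          rw [lastT_cons_ne t w y r2 (fun hh => hwt hh.symm), lastT_dropWhile w t r2 hwt]
        simp [gOut, this]
      rw [hcong, List.flatMap_cons]
      congr 1
      simp only [gOut, hlast, lastT_nil, ne_eq]
      by_cases hne : lastFrom t y r2 = "[no event]"
      · simp [hne]
      · simp [hne, Ne.symm hne]
    | (t1, x) :: r1, (t2, y) :: r2 =>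
      rw [List.pairwise_cons] at h1 h2
      have hlb1 : ∀ p ∈ r1, t1 ≤ p.1 := fun p hp => h1.1 p hp
      have hlb2 : ∀ p ∈ r2, t2 ≤ p.1 := fun p hp => h2.1 p hp
      rcases lt_trichotomy t1 t2 with hlt | heq | hgt
      · -- t1 < t2 : consume run from side 1
        have hpr := popRun_eq t1 x r1 hlb1 h1.2
        set r1' := r1.dropWhile (fun p => p.1 == t1) with hr1'
        have hs2keys : ∀ p ∈ (t2, y) :: r2, t1 < p.1 := by
          intro p hp
          rcases List.mem_cons.mp hp with rfl | hp'
          · simpa using hlt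
          · have := hlb2 p hp'; omega
        have hUlb : ∀ u ∈ U, t1 ≤ u := by
          intro u hu
          rcases (hmem u).mp hu with h | h
          · rcases List.mem_map.mp h with ⟨p, hp, rfl⟩
            rcases List.mem_cons.mp hp with rfl | hp'
            · simp
            · exact hlb1 p hp'
          · rcases List.mem_map.mp h with ⟨p, hp, rfl⟩
            have := hs2keys p hp; omega
        obtain ⟨V, rfl, hV, hVgt⟩ := U_decomp U t1 hU ((hmem t1).mpr (by simp)) hUlb
        have hVmem : ∀ w, w ∈ V ↔ w ∈ r1'.map (fun p => p.1) ∨ w ∈ ((t2, y) :: r2).map (fun p => p.1) := by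
          intro w
          constructor
          · intro hw
            have hwt : w ≠ t1 := by have := hVgt w hw; omega
            rcases (hmem w).mp (by simp [hw]) with h | h
            · rcases List.mem_map.mp h with ⟨p, hp, rfl⟩
              rcases List.mem_cons.mp hp with rfl | hp'
              · simp at hwt
              · exact Or.inl ((keys_dropWhile_mem _ t1 r1 hwt).mpr (List.mem_map_of_mem hp'))
            · exact Or.inr h
          · intro hw
            have hwU : w ∈ t1 :: V := by
              rcases hw with hw | hw
              · rcases List.mem_map.mp hw with ⟨p, hp, rfl⟩
                exact (hmem p.1).mpr (Or.inl (List.mem_map_of_mem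
                  (List.mem_cons_of_mem _ ((List.dropWhile_sublist _).subset hp))))
              · exact (hmem w).mpr (Or.inr hw)
            have hwt : w ≠ t1 := by
              rcases hw with hw | hw
              · rcases List.mem_map.mp hw with ⟨p, hp, rfl⟩
                have := dropWhile_keys_gt t1 r1 hlb1 h1.2 p hp; omega
              · rcases List.mem_map.mp hw with ⟨p, hp, rfl⟩
                have := hs2keys p hp; omega
            rcases List.mem_cons.mp hwU with h | h
            · exact absurd h hwt
            · exact h
        have hlen' : r1'.length + ((t2, y) :: r2).length ≤ N := by
          have := List.Sublist.length_le (List.dropWhile_sublist (l := r1) (p := fun p => p.1 == t1))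
          rw [← hr1'] at this
          simp only [List.length_cons] at hlen ⊢
          omega
        have hsort' : r1'.Pairwise (fun a b => a.1 ≤ b.1) :=
          h1.2.sublist (List.dropWhile_sublist _)
        have hIH := ihN r1' ((t2, y) :: r2) V hlen' hsort' (List.pairwise_cons.mpr h2) hV hVmem
        have hlast : lastT t1 ((t1, x) :: r1) = lastFrom t1 x r1 := lastT_cons_self t1 x r1
        have hlast2 : lastT t1 ((t2, y) :: r2) = "[no event]" :=
          lastFrom_no_match t1 _ _ (fun p hp => by have := hs2keys p hp; omega)
        simp only [mergeDiff, if_pos hlt, hpr]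
        rw [hIH]
        have hcong : V.flatMap (gOut r1' ((t2, y) :: r2)) = V.flatMap (gOut ((t1, x) :: r1) ((t2, y) :: r2)) := by
          apply List.flatMap_congr
          intro w hw
          have hwt : w ≠ t1 := by have := hVgt w hw; omega
          have : lastT w ((t1, x) :: r1) = lastT w r1' := by
            rw [lastT_cons_ne t1 w x r1 (fun hh => hwt hh.symm), lastT_dropWhile w t1 r1 hwt]
          simp [gOut, this]
        rw [hcong, List.flatMap_cons]
        congr 1
        simp only [gOut, hlast, hlast2]
      · -- t1 = t2 : consume both runs
        subst heq
        have hpr1 := popRun_eq t1 x r1 hlb1 h1.2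
        have hpr2 := popRun_eq t1 y r2 hlb2 h2.2
        set r1' := r1.dropWhile (fun p => p.1 == t1) with hr1'
        set r2' := r2.dropWhile (fun p => p.1 == t1) with hr2'
        have hUlb : ∀ u ∈ U, t1 ≤ u := by
          intro u hu
          rcases (hmem u).mp hu with h | h <;>
          · rcases List.mem_map.mp h with ⟨p, hp, rfl⟩
            rcases List.mem_cons.mp hp with rfl | hp'
            · simp
            · first | exact hlb1 p hp' | exact hlb2 p hp'
        obtain ⟨V, rfl, hV, hVgt⟩ := U_decomp U t1 hU ((hmem t1).mpr (by simp)) hUlb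
        have hVmem : ∀ w, w ∈ V ↔ w ∈ r1'.map (fun p => p.1) ∨ w ∈ r2'.map (fun p => p.1) := by
          intro w
          constructor
          · intro hw
            have hwt : w ≠ t1 := by have := hVgt w hw; omega
            rcases (hmem w).mp (by simp [hw]) with h | h
            · rcases List.mem_map.mp h with ⟨p, hp, rfl⟩
              rcases List.mem_cons.mp hp with rfl | hp'
              · simp at hwt
              · exact Or.inl ((keys_dropWhile_mem _ t1 r1 hwt).mpr (List.mem_map_of_mem hp'))
            · rcases List.mem_map.mp h with ⟨p, hp, rfl⟩
              rcases List.mem_cons.mp hp with rfl | hp'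
              · simp at hwt
              · exact Or.inr ((keys_dropWhile_mem _ t1 r2 hwt).mpr (List.mem_map_of_mem hp'))
          · intro hw
            have hwt : w ≠ t1 := by
              rcases hw with hw | hw <;> rcases List.mem_map.mp hw with ⟨p, hp, rfl⟩
              · have := dropWhile_keys_gt t1 r1 hlb1 h1.2 p hp; omega
              · have := dropWhile_keys_gt t1 r2 hlb2 h2.2 p hp; omega
            have hwU : w ∈ t1 :: V := by
              rcases hw with hw | hw <;> rcases List.mem_map.mp hw with ⟨p, hp, rfl⟩
              · exact (hmem p.1).mpr (Or.inl (List.mem_map_of_mem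
                  (List.mem_cons_of_mem _ ((List.dropWhile_sublist _).subset hp))))
              · exact (hmem p.1).mpr (Or.inr (List.mem_map_of_mem
                  (List.mem_cons_of_mem _ ((List.dropWhile_sublist _).subset hp))))
            rcases List.mem_cons.mp hwU with h | h
            · exact absurd h hwt
            · exact h
        have hlen' : r1'.length + r2'.length ≤ N := by
          have u1 := List.Sublist.length_le (List.dropWhile_sublist (l := r1) (p := fun p => p.1 == t1))
          have u2 := List.Sublist.length_le (List.dropWhile_sublist (l := r2) (p := fun p => p.1 == t1))
          rw [← hr1'] at u1
          rw [← hr2'] at u2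
          simp only [List.length_cons] at hlen
          omega
        have hIH := ihN r1' r2' V hlen'
          (h1.2.sublist (List.dropWhile_sublist _)) (h2.2.sublist (List.dropWhile_sublist _)) hV hVmem
        have hlast1 : lastT t1 ((t1, x) :: r1) = lastFrom t1 x r1 := lastT_cons_self t1 x r1
        have hlast2 : lastT t1 ((t1, y) :: r2) = lastFrom t1 y r2 := lastT_cons_self t1 y r2
        simp only [mergeDiff, lt_irrefl, if_false, hpr1, hpr2]
        rw [hIH]
        have hcong : V.flatMap (gOut r1' r2') = V.flatMap (gOut ((t1, x) :: r1) ((t1, y) :: r2)) := by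
          apply List.flatMap_congr
          intro w hw
          have hwt : w ≠ t1 := by have := hVgt w hw; omega
          have e1 : lastT w ((t1, x) :: r1) = lastT w r1' := by
            rw [lastT_cons_ne t1 w x r1 (fun hh => hwt hh.symm), lastT_dropWhile w t1 r1 hwt]
          have e2 : lastT w ((t1, y) :: r2) = lastT w r2' := by
            rw [lastT_cons_ne t1 w y r2 (fun hh => hwt hh.symm), lastT_dropWhile w t1 r2 hwt]
          simp [gOut, e1, e2]
        rw [hcong, List.flatMap_cons]
        congr 1
        simp only [gOut, hlast1, hlast2]
      · -- t2 < t1 : consume run from side 2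
        have hpr := popRun_eq t2 y r2 hlb2 h2.2
        set r2' := r2.dropWhile (fun p => p.1 == t2) with hr2'
        have hs1keys : ∀ p ∈ (t1, x) :: r1, t2 < p.1 := by
          intro p hp
          rcases List.mem_cons.mp hp with rfl | hp'
          · simpa using hgt
          · have := hlb1 p hp'; omega
        have hUlb : ∀ u ∈ U, t2 ≤ u := by
          intro u hu
          rcases (hmem u).mp hu with h | h
          · rcases List.mem_map.mp h with ⟨p, hp, rfl⟩
            have := hs1keys p hp; omega
          · rcases List.mem_map.mp h with ⟨p, hp, rfl⟩
            rcases List.mem_cons.mp hp with rfl | hp'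
            · simp
            · exact hlb2 p hp'
        obtain ⟨V, rfl, hV, hVgt⟩ := U_decomp U t2 hU ((hmem t2).mpr (by simp)) hUlb
        have hVmem : ∀ w, w ∈ V ↔ w ∈ ((t1, x) :: r1).map (fun p => p.1) ∨ w ∈ r2'.map (fun p => p.1) := by
          intro w
          constructor
          · intro hw
            have hwt : w ≠ t2 := by have := hVgt w hw; omega
            rcases (hmem w).mp (by simp [hw]) with h | h
            · exact Or.inl h
            · rcases List.mem_map.mp h with ⟨p, hp, rfl⟩
              rcases List.mem_cons.mp hp with rfl | hp'
              · simp at hwt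
              · exact Or.inr ((keys_dropWhile_mem _ t2 r2 hwt).mpr (List.mem_map_of_mem hp'))
          · intro hw
            have hwU : w ∈ t2 :: V := by
              rcases hw with hw | hw
              · exact (hmem w).mpr (Or.inl hw)
              · rcases List.mem_map.mp hw with ⟨p, hp, rfl⟩
                exact (hmem p.1).mpr (Or.inr (List.mem_map_of_mem
                  (List.mem_cons_of_mem _ ((List.dropWhile_sublist _).subset hp))))
            have hwt : w ≠ t2 := by
              rcases hw with hw | hw
              · rcases List.mem_map.mp hw with ⟨p, hp, rfl⟩
                have := hs1keys p hp; omega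
              · rcases List.mem_map.mp hw with ⟨p, hp, rfl⟩
                have := dropWhile_keys_gt t2 r2 hlb2 h2.2 p hp; omega
            rcases List.mem_cons.mp hwU with h | h
            · exact absurd h hwt
            · exact h
        have hlen' : ((t1, x) :: r1).length + r2'.length ≤ N := by
          have := List.Sublist.length_le (List.dropWhile_sublist (l := r2) (p := fun p => p.1 == t2))
          rw [← hr2'] at this
          simp only [List.length_cons] at hlen ⊢
          omega
        have hsort' : r2'.Pairwise (fun a b => a.1 ≤ b.1) :=
          h2.2.sublist (List.dropWhile_sublist _)
        have hIH := ihN ((t1, x) :: r1) r2' V hlen' (List.pairwise_cons.mpr h1) hsort' hV hVmem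
        have hlast : lastT t2 ((t2, y) :: r2) = lastFrom t2 y r2 := lastT_cons_self t2 y r2
        have hlast1 : lastT t2 ((t1, x) :: r1) = "[no event]" :=
          lastFrom_no_match t2 _ _ (fun p hp => by have := hs1keys p hp; omega)
        simp only [mergeDiff, if_neg (by omega : ¬ t1 < t2), if_pos hgt, hpr]
        rw [hIH]
        have hcong : V.flatMap (gOut ((t1, x) :: r1) r2') = V.flatMap (gOut ((t1, x) :: r1) ((t2, y) :: r2)) := by
          apply List.flatMap_congr
          intro w hw
          have hwt : w ≠ t2 := by have := hVgt w hw; omega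
          have : lastT w ((t2, y) :: r2) = lastT w r2' := by
            rw [lastT_cons_ne t2 w y r2 (fun hh => hwt hh.symm), lastT_dropWhile w t2 r2 hwt]
          simp [gOut, this]
        rw [hcong, List.flatMap_cons]
        congr 1
        simp only [gOut, hlast, hlast1, ne_eq]
        by_cases hne : lastFrom t2 y r2 = "[no event]"
        · simp [hne]
        · simp [hne, Ne.symm hne]

theorem main_equiv (t1 t2 : List (Int × String)) :
    compare_text_events t1 t2 = compare_text_events_alt t1 t2 := by
  unfold compare_text_events_alt
  set s1 := PySem.List.sorted t1 (fun p => p.1) with hs1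
  set s2 := PySem.List.sorted t2 (fun p => p.1) with hs2
  set U := PySem.List.sorted (PySem.Set.union (PySem.Set.ofList (t1.map (fun p => p.1)))
            (PySem.Set.ofList (t2.map (fun p => p.1)))) (fun x => x) with hUdef
  have hperm1 : s1.Perm t1 := PySem.List.sorted_perm t1 (fun p => p.1) false
  have hperm2 : s2.Perm t2 := PySem.List.sorted_perm t2 (fun p => p.1) false
  have hUnodup : U.Nodup := by
    have h1 : (PySem.Set.union (PySem.Set.ofList (t1.map (fun p => p.1)))
        (PySem.Set.ofList (t2.map (fun p => p.1)))).Nodup :=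
      PySem.Set.nodup_union _ _ (PySem.Set.nodup_ofList _)
    exact (PySem.List.sorted_perm _ _ false).symm.nodup h1
  have hUlt : U.Pairwise (· < ·) := by
    have hle : U.Pairwise (fun a b => a ≤ b) := PySem.List.sorted_pairwise _ _
    exact (hle.and hUnodup).imp (fun h => lt_of_le_of_ne h.1 h.2)
  have hmem : ∀ u, u ∈ U ↔ u ∈ s1.map (fun p => p.1) ∨ u ∈ s2.map (fun p => p.1) := by
    intro u
    simp only [hUdef, PySem.List.mem_sorted, PySem.Set.mem_union, PySem.Set.mem_ofList,
      (hperm1.map (fun p => p.1)).mem_iff, (hperm2.map (fun p => p.1)).mem_iff]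
  have h := merge_eq (s1.length + s2.length) s1 s2 U le_rfl
    (PySem.List.sorted_pairwise t1 (fun p => p.1)) (PySem.List.sorted_pairwise t2 (fun p => p.1))
    hUlt hmem
  rw [h, A_eq_flatMap]
  apply List.flatMap_congr
  intro w _
  simp only [gOut, hs1, hs2, lastT_sorted]

-- ===== VERDICT (by name: the statement is the Claim_ definition above) =====
theorem compare_text_events_spec : Claim_equal_compare_text_events := by
  intro t1 t2 _
  exact main_equiv t1 t2
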